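-- pv_equiv track=rewrite | github.com/keremidarski/softserve | python_core_1/task03.py | identical_filter
-- ===== SOURCE A (Python) =====
-- def identical_filter(words):
--     identicals = []
--
--     for word in words:
--         char_occur = {}
--
--         for char in word:
--             char_occur[char] = char_occur.get(char, 0) + 1
--
--         if len(char_occur) == 1:
--             identicals.append(word)
--
--     return identicals
-- ===== SOURCE B (Python) =====
-- def identical_filter(words):
--     return [w for w in words if w and all(c == w[0] for c in w)]
-- ===== Notes on version B (the rewrite author's own statement) =====
-- stated objective: simpler
-- what changed: Replaces the per-word frequency dictionary (built char-by-char, then sized) with a single-pass all-equal-to-first check inside one comprehension, short-circuiting on the first differing character.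
import Mathlib
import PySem

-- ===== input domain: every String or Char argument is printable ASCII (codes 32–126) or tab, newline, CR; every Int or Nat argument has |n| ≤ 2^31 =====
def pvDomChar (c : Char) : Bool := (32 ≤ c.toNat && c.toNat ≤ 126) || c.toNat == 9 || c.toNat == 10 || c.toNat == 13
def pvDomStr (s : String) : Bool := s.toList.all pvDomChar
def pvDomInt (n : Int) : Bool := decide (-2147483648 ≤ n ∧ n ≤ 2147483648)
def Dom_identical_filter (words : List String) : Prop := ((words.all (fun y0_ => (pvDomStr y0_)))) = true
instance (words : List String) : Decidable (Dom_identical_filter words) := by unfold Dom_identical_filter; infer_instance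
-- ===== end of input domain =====

-- B replaces A's per-word char-frequency dictionary with a plain "non-empty and all characters equal the first" filter (objective: simpler; same cost).


-- ===== PORT A =====
-- Port of A: for each word build a char-frequency dict, keep the word if the dict has exactly one key.
def identical_filter (words : List String) : List String :=
  words.foldl (fun identicals word =>
    let char_occur : PySem.Dict Char Int :=
      word.toList.foldl (fun d c => d.insert c (d.getD c 0 + 1)) PySem.Dict.empty
    if char_occur.size = 1 then identicals ++ [word] else identicals) []

-- ===== PORT B =====
-- Port of B: keep w when it is non-empty and every character equals the first.
def identical_filter_alt (words : List String) : List String :=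
  words.filter (fun w =>
    match w.toList with
    | [] => false
    | c :: rest => rest.all (fun x => x == c))

-- ===== PRECONDITION & SPEC =====
def Spec_identical_filter (words : List String) (out : List String) : Prop := out = identical_filter_alt words
instance (words : List String) (out : List String) : Decidable (Spec_identical_filter words out) := by unfold Spec_identical_filter; infer_instance

-- ===== CLAIM (what is proved, stated in full; the proofs are below) =====
def Claim_equal_identical_filter : Prop := ∀ (words : List String), Dom_identical_filter words → Spec_identical_filter words (identical_filter words)

-- ===== LEMMAS AND PROOFS =====

-- ===== VERDICT (by name: the statement is the Claim_ definition above) =====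
-- the dict's key list after the counting loop is exactly set(word's chars)
theorem keyset_of_word (cs : List Char) :
    (cs.foldl (fun d c => d.insert c (d.getD c 0 + 1)) (PySem.Dict.empty : PySem.Dict Char Int)).keys
      = PySem.Set.ofList cs := by
  rw [PySem.Dict.keys_foldl_insert]
  simp [PySem.Dict.keys_empty, PySem.Set.update_nil_left]

theorem len_ofList_eq_one (cs : List Char) :
    (PySem.Set.ofList cs).length = 1 ↔
      (match cs with
       | [] => false
       | c :: rest => rest.all (fun x => x == c)) = true := by
  cases cs with
  | nil => simp [PySem.Set.ofList_nil]
  | cons c rest =>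
    rw [PySem.Set.ofList_cons]
    simp only [List.length_cons, List.all_eq_true]
    constructor
    · intro h x hx
      have h0 : ((PySem.Set.ofList rest).discard c) = [] :=
        List.eq_nil_of_length_eq_zero (by omega)
      by_contra hne
      have hm : x ∈ (PySem.Set.ofList rest).discard c := by
        rw [PySem.Set.mem_discard]
        exact ⟨(PySem.Set.mem_ofList _ _).2 hx, by simpa using hne⟩
      rw [h0] at hm
      exact (List.not_mem_nil) hm
    · intro h
      have h0 : (PySem.Set.ofList rest).discard c = [] := by
        rw [List.eq_nil_iff_forall_not_mem]
        intro x hx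
        rw [PySem.Set.mem_discard, PySem.Set.mem_ofList] at hx
        exact hx.2 (by simpa using h x hx.1)
      simp [h0]

theorem identical_filter_spec : Claim_equal_identical_filter := by
  intro words _
  unfold Spec_identical_filter identical_filter identical_filter_alt
  rw [PySem.List.foldl_congr_mem (g := fun acc w =>
        if (match w.toList with
            | [] => false
            | c :: rest => rest.all (fun x => x == c)) = true
        then acc ++ [w] else acc)]
  · rw [PySem.List.foldl_append_ite_eq_filter]
    simp
  · intro acc w _
    simp only [PySem.Dict.size]
    have hk := keyset_of_word w.toList
    have : ((w.toList.foldl (fun d c => d.insert c (d.getD c 0 + 1))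
        (PySem.Dict.empty : PySem.Dict Char Int)).items.map (·.1)).length
        = (PySem.Set.ofList w.toList).length := by
      rw [← hk]; rfl
    rw [List.length_map] at this
    simp only [this]
    by_cases h : (PySem.Set.ofList w.toList).length = 1
    · rw [if_pos h, if_pos ((len_ofList_eq_one w.toList).1 h)]
    · rw [if_neg h, if_neg (fun hb => h ((len_ofList_eq_one w.toList).2 hb))]
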